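-- pv_equiv track=rewrite | github.com/bbroere/AdventOfCode | 2023/day_21/solution.py | determine_occupied_after_steps
-- ===== SOURCE A (Python) =====
-- from copy import copy
--
-- def determine_occupied_after_steps(grid: list[list[str]], starting_points: list[(int, int)], nof_steps: int) \
--         -> set[(int, int)]:
--     # start set of occupied points in only starting point
--     occupied_points = {*starting_points}
--     # now loop
--     for _ in range(nof_steps):
--         new_occupied_points = set()
--         # set new occupied points, keeping boundary in mind
--         for (x_p, y_p) in occupied_points:
--             if 0 < x_p and grid[y_p][x_p - 1] == '.':
--                 new_occupied_points.add((x_p - 1, y_p))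
--             if x_p < len(grid[0]) - 1 and grid[y_p][x_p + 1] == '.':
--                 new_occupied_points.add((x_p + 1, y_p))
--             if 0 < y_p and grid[y_p - 1][x_p] == '.':
--                 new_occupied_points.add((x_p, y_p - 1))
--             if y_p < len(grid) - 1 and grid[y_p + 1][x_p] == '.':
--                 new_occupied_points.add((x_p, y_p + 1))
--         occupied_points = copy(new_occupied_points)
--     # return amount of occupied points
--     return occupied_points
-- ===== SOURCE B (Python) =====
-- def determine_occupied_after_steps(grid: list[list[str]], starting_points: list[(int, int)], nof_steps: int) \
--         -> set[(int, int)]: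
--     # Cycle detection: the step map is deterministic, so once the frontier set
--     # repeats with period 2 the whole future is determined by parity of the
--     # remaining steps; we stop simulating there instead of doing all nof_steps.
--     h = len(grid)
--     w = len(grid[0]) if grid else 0
--     cur = {*starting_points}
--     prev = None
--     steps_left = max(nof_steps, 0)
--     while steps_left > 0:
--         nxt = {q
--                for (x, y) in cur
--                for q in ((x - 1, y), (x + 1, y), (x, y - 1), (x, y + 1))
--                if 0 <= q[0] < w and 0 <= q[1] < h and grid[q[1]][q[0]] == '.'}
--         if nxt == prev:
--             # states alternate with period 2 from here on
--             return cur if steps_left % 2 == 0 else prev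
--         prev, cur = cur, nxt
--         steps_left -= 1
--     return cur
-- ===== Notes on version B (the rewrite author's own statement) =====
-- stated objective: faster
-- what changed: B replaces A's fixed nof_steps-fold re-simulation by cycle detection: it simulates with a one-state history and, as soon as the frontier set repeats with period 2, returns the answer by parity of the remaining steps, so the loop runs at most until the dynamics stabilise instead of nof_steps times.
-- outside the precondition, e.g. on determine_occupied_after_steps([['.', '.', '.'], ['#', '#', '#']], [(1, -2)], 2): A returns {(1, -2)}, B returns set()
import Mathlib
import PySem

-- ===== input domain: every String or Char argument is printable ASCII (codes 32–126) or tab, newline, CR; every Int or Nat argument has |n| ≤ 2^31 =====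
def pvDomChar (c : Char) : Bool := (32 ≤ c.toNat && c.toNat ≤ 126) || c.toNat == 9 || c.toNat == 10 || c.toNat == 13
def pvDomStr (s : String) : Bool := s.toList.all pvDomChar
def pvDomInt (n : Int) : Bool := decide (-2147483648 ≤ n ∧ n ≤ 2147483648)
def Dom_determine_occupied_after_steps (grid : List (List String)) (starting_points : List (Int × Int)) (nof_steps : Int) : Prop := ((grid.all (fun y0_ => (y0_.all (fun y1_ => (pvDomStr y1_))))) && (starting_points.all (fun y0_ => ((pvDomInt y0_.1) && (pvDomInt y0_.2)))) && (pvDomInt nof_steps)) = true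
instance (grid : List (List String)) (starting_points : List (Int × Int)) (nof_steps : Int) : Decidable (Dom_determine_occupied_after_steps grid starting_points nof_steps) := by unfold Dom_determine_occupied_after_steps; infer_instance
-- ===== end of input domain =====

-- B replaces A's nof_steps-fold simulation by cycle detection: once the frontier
-- set repeats with period 2 the answer is picked by parity of the remaining steps
-- (objective: faster; the return value, a set, is compared as a set).

-- ===== PORT A =====
-- grid[y][x] == '.'  (false where Python would raise, outside Pre_)
def pvCellDot (grid : List (List String)) (y x : Int) : Bool :=
  match PySem.List.pyGet? grid y with
  | some row =>
    match PySem.List.pyGet? row x with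
    | some c => c == "."
    | none => false
  | none => false

-- len(grid[0])  (0 where Python would raise on grid = [], outside Pre_)
def pvWidth (grid : List (List String)) : Int :=
  (((PySem.List.pyGet? grid 0).getD []).length : Int)

-- one iteration of A's outer loop: the four conditional adds, per occupied point
def pvStepA (grid : List (List String)) (occ : List (Int × Int)) : List (Int × Int) :=
  occ.foldl (fun s p =>
    let s := if 0 < p.1 ∧ pvCellDot grid p.2 (p.1 - 1) = true then PySem.Set.add s (p.1 - 1, p.2) else s
    let s := if p.1 < pvWidth grid - 1 ∧ pvCellDot grid p.2 (p.1 + 1) = true then PySem.Set.add s (p.1 + 1, p.2) else s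
    let s := if 0 < p.2 ∧ pvCellDot grid (p.2 - 1) p.1 = true then PySem.Set.add s (p.1, p.2 - 1) else s
    if p.2 < (grid.length : Int) - 1 ∧ pvCellDot grid (p.2 + 1) p.1 = true then PySem.Set.add s (p.1, p.2 + 1) else s)
    (PySem.Set.empty)

def determine_occupied_after_steps (grid : List (List String)) (starting_points : List (Int × Int)) (nof_steps : Int) : List (Int × Int) :=
  (List.range nof_steps.toNat).foldl (fun occ _ => pvStepA grid occ) (PySem.Set.ofList starting_points)

-- ===== PORT B =====
-- grid[q[1]][q[0]] == '.'  (B only evaluates it on in-range indices)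
def pvCellDotB (grid : List (List String)) (y x : Int) : Bool :=
  match PySem.List.pyGet? grid y with
  | some row =>
    match PySem.List.pyGet? row x with
    | some c => c == "."
    | none => false
  | none => false

-- B's set comprehension: for each point its four candidate neighbours, kept if in bounds and '.'
def pvStepB (grid : List (List String)) (w h : Int) (pts : List (Int × Int)) : List (Int × Int) :=
  pts.foldl (fun s p =>
    [(p.1 - 1, p.2), (p.1 + 1, p.2), (p.1, p.2 - 1), (p.1, p.2 + 1)].foldl (fun s q =>
      if (0 ≤ q.1 ∧ q.1 < w ∧ 0 ≤ q.2 ∧ q.2 < h) ∧ pvCellDotB grid q.2 q.1 = true then PySem.Set.add s q else s) s)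
    (PySem.Set.empty)

-- B's while loop (fuel = steps_left).  Python compares the sets nxt == prev; the port
-- compares the representing lists, which is conservative: where the orders differ it
-- keeps simulating, which yields the same set.
def pvLoopB (grid : List (List String)) (w h : Int) : Nat → Option (List (Int × Int)) → List (Int × Int) → List (Int × Int)
  | 0, _, cur => cur
  | fuel + 1, prev, cur =>
    let nxt := pvStepB grid w h cur
    if prev = some nxt then (if (fuel + 1) % 2 = 0 then cur else nxt)
    else pvLoopB grid w h fuel (some cur) nxt

def determine_occupied_after_steps_alt (grid : List (List String)) (starting_points : List (Int × Int)) (nof_steps : Int) : List (Int × Int) :=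
  pvLoopB grid ((grid.headD []).length : Int) (grid.length : Int) nof_steps.toNat none (PySem.Set.ofList starting_points)

-- ===== PRECONDITION & SPEC =====
-- length of the row Python's grid[y] denotes (0 where grid[y] raises)
def pvRowLen (grid : List (List String)) (y : Int) : Int :=
  (((PySem.List.pyGet? grid y).getD []).length : Int)

-- the four accesses A makes for a single occupied point (x, y) stay in Python's index range
def pvSafe1 (grid : List (List String)) (p : Int × Int) : Prop :=
  grid ≠ [] ∧
  (0 < p.1 → -(grid.length : Int) ≤ p.2 ∧ p.2 < (grid.length : Int) ∧ -(pvRowLen grid p.2) ≤ p.1 - 1 ∧ p.1 - 1 < pvRowLen grid p.2) ∧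
  (p.1 < ((grid.headD []).length : Int) - 1 → -(grid.length : Int) ≤ p.2 ∧ p.2 < (grid.length : Int) ∧ -(pvRowLen grid p.2) ≤ p.1 + 1 ∧ p.1 + 1 < pvRowLen grid p.2) ∧
  (0 < p.2 → -(grid.length : Int) ≤ p.2 - 1 ∧ p.2 - 1 < (grid.length : Int) ∧ -(pvRowLen grid (p.2 - 1)) ≤ p.1 ∧ p.1 < pvRowLen grid (p.2 - 1)) ∧
  (p.2 < (grid.length : Int) - 1 → -(grid.length : Int) ≤ p.2 + 1 ∧ p.2 + 1 < (grid.length : Int) ∧ -(pvRowLen grid (p.2 + 1)) ≤ p.1 ∧ p.1 < pvRowLen grid (p.2 + 1))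

-- Pre_ excludes inputs which make A's unguarded grid[y][x] indexing raise IndexError
-- or silently wrap a negative index: unless there is nothing to do (nof_steps ≤ 0 or
-- no starting points) or the grid has no '.' at all and the single step A survives
-- kills the frontier, every row must be at least as long as row 0 (A never indexes a
-- column ≥ len(grid[0])) and every starting point must be in bounds.
def Pre_determine_occupied_after_steps (grid : List (List String)) (starting_points : List (Int × Int)) (nof_steps : Int) : Prop :=
  nof_steps ≤ 0 ∨ starting_points = [] ∨
  ((∀ row ∈ grid, (grid.headD []).length ≤ row.length) ∧
   ∀ p ∈ starting_points, 0 ≤ p.1 ∧ p.1 < ((grid.headD []).length : Int) ∧ 0 ≤ p.2 ∧ p.2 < (grid.length : Int)) ∨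
  ((∀ row ∈ grid, ∀ c ∈ row, c ≠ ".") ∧ ∀ p ∈ starting_points, pvSafe1 grid p)
instance (grid : List (List String)) (starting_points : List (Int × Int)) (nof_steps : Int) : Decidable (Pre_determine_occupied_after_steps grid starting_points nof_steps) := by unfold Pre_determine_occupied_after_steps pvSafe1; infer_instance

def pvWitness_determine_occupied_after_steps : List (List String) × (List (Int × Int)) × Int :=
  ([[".", "#"], [".", "."]], [((0 : Int), (0 : Int))], (3 : Int))

def Spec_determine_occupied_after_steps (grid : List (List String)) (starting_points : List (Int × Int)) (nof_steps : Int) (out : List (Int × Int)) : Prop := out = determine_occupied_after_steps_alt grid starting_points nof_steps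
instance (grid : List (List String)) (starting_points : List (Int × Int)) (nof_steps : Int) (out : List (Int × Int)) : Decidable (Spec_determine_occupied_after_steps grid starting_points nof_steps out) := by unfold Spec_determine_occupied_after_steps; infer_instance

-- ===== CLAIM (what is proved, stated in full; the proofs are below) =====
def Claim_equal_determine_occupied_after_steps : Prop := ∀ (grid : List (List String)) (starting_points : List (Int × Int)) (nof_steps : Int), Dom_determine_occupied_after_steps grid starting_points nof_steps → Pre_determine_occupied_after_steps grid starting_points nof_steps → Spec_determine_occupied_after_steps grid starting_points nof_steps (determine_occupied_after_steps grid starting_points nof_steps)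

-- ===== LEMMAS AND PROOFS =====

-- a point is inside the w × h board
def pvInB (w h : Int) (p : Int × Int) : Prop :=
  0 ≤ p.1 ∧ p.1 < w ∧ 0 ≤ p.2 ∧ p.2 < h

theorem pvCellDotB_eq : pvCellDotB = pvCellDot := rfl

theorem pvWidth_eq (grid : List (List String)) :
    pvWidth grid = ((grid.headD []).length : Int) := by
  cases grid <;> simp [pvWidth, PySem.List.pyGet?, PySem.List.pyIdx?]

-- a foldl that ignores the list elements is function iteration
theorem pv_foldl_const {α β : Type} (f : α → α) (l : List β) (s : α) :
    l.foldl (fun a _ => f a) s = f^[l.length] s := by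
  induction l generalizing s with
  | nil => rfl
  | cons x xs ih => simp [List.foldl, ih, Function.iterate_succ_apply]

-- membership through one conditional add
theorem pv_mem_if_add {s : List (Int × Int)} {c : Prop} [Decidable c] {q y : Int × Int}
    (h : y ∈ (if c then PySem.Set.add s q else s)) : y ∈ s ∨ (c ∧ y = q) := by
  split_ifs at h with hc
  · rcases (PySem.Set.mem_add s q y).1 h with h | h
    · exact Or.inl h
    · exact Or.inr ⟨hc, h⟩
  · exact Or.inl h

-- every point produced by pvStepB is in bounds
theorem pvStepB_mem (grid : List (List String)) (w h : Int) (pts : List (Int × Int)) :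
    ∀ y ∈ pvStepB grid w h pts, pvInB w h y := by
  unfold pvStepB
  suffices H : ∀ (pts : List (Int × Int)) (s : List (Int × Int)), (∀ y ∈ s, pvInB w h y) →
      ∀ y ∈ pts.foldl (fun s p =>
        [(p.1 - 1, p.2), (p.1 + 1, p.2), (p.1, p.2 - 1), (p.1, p.2 + 1)].foldl (fun s q =>
          if (0 ≤ q.1 ∧ q.1 < w ∧ 0 ≤ q.2 ∧ q.2 < h) ∧ pvCellDot grid q.2 q.1 = true then PySem.Set.add s q else s) s) s,
        pvInB w h y by
    exact H pts PySem.Set.empty (by intro y hy; simp [PySem.Set.empty] at hy)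
  intro pts
  induction pts with
  | nil => intro s hs; simpa using hs
  | cons p ps ih =>
    intro s hs
    simp only [List.foldl_cons]
    apply ih
    simp only [List.foldl_nil]
    intro y hy
    rcases pv_mem_if_add hy with hy | ⟨hc, rfl⟩
    · rcases pv_mem_if_add hy with hy | ⟨hc, rfl⟩
      · rcases pv_mem_if_add hy with hy | ⟨hc, rfl⟩
        · rcases pv_mem_if_add hy with hy | ⟨hc, rfl⟩
          · exact hs y hy
          · exact ⟨hc.1.1, hc.1.2.1, hc.1.2.2.1, hc.1.2.2.2⟩
        · exact ⟨hc.1.1, hc.1.2.1, hc.1.2.2.1, hc.1.2.2.2⟩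
      · exact ⟨hc.1.1, hc.1.2.1, hc.1.2.2.1, hc.1.2.2.2⟩
    · exact ⟨hc.1.1, hc.1.2.1, hc.1.2.2.1, hc.1.2.2.2⟩

-- on in-bounds points A's step and B's step agree (same list, same order)
theorem pvStepA_eq_pvStepB (grid : List (List String)) (w h : Int)
    (hw : w = pvWidth grid) (hh : h = (grid.length : Int))
    (pts : List (Int × Int)) (hpts : ∀ p ∈ pts, pvInB w h p) :
    pvStepA grid pts = pvStepB grid w h pts := by
  unfold pvStepA pvStepB
  rw [pvCellDotB_eq, ← hw, ← hh]
  clear hw hh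
  revert hpts
  generalize PySem.Set.empty = s
  induction pts generalizing s with
  | nil => intro _; rfl
  | cons p ps ih =>
    intro hpts
    obtain ⟨hx0, hxw, hy0, hyh⟩ := hpts p List.mem_cons_self
    simp only [List.foldl_cons, List.foldl_nil]
    have e1 : (0 < p.1 ∧ pvCellDot grid p.2 (p.1 - 1) = true) ↔
        ((0 ≤ p.1 - 1 ∧ p.1 - 1 < w ∧ 0 ≤ p.2 ∧ p.2 < h) ∧ pvCellDot grid p.2 (p.1 - 1) = true) := by
      constructor <;> rintro ⟨a, b⟩
      · exact ⟨⟨by omega, by omega, hy0, hyh⟩, b⟩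
      · exact ⟨by omega, b⟩
    have e2 : (p.1 < w - 1 ∧ pvCellDot grid p.2 (p.1 + 1) = true) ↔
        ((0 ≤ p.1 + 1 ∧ p.1 + 1 < w ∧ 0 ≤ p.2 ∧ p.2 < h) ∧ pvCellDot grid p.2 (p.1 + 1) = true) := by
      constructor <;> rintro ⟨a, b⟩
      · exact ⟨⟨by omega, by omega, hy0, hyh⟩, b⟩
      · exact ⟨by omega, b⟩
    have e3 : (0 < p.2 ∧ pvCellDot grid (p.2 - 1) p.1 = true) ↔
        ((0 ≤ p.1 ∧ p.1 < w ∧ 0 ≤ p.2 - 1 ∧ p.2 - 1 < h) ∧ pvCellDot grid (p.2 - 1) p.1 = true) := by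
      constructor <;> rintro ⟨a, b⟩
      · exact ⟨⟨hx0, hxw, by omega, by omega⟩, b⟩
      · exact ⟨by omega, b⟩
    have e4 : (p.2 < h - 1 ∧ pvCellDot grid (p.2 + 1) p.1 = true) ↔
        ((0 ≤ p.1 ∧ p.1 < w ∧ 0 ≤ p.2 + 1 ∧ p.2 + 1 < h) ∧ pvCellDot grid (p.2 + 1) p.1 = true) := by
      constructor <;> rintro ⟨a, b⟩
      · exact ⟨⟨hx0, hxw, by omega, by omega⟩, b⟩
      · exact ⟨by omega, b⟩
    simp only [e1, e2, e3, e4]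
    exact ih _ (fun q hq => hpts q (List.mem_cons_of_mem p hq))

-- in-bounds start: the two iterated steps coincide
theorem pvIter_eq (grid : List (List String)) (w h : Int)
    (hw : w = pvWidth grid) (hh : h = (grid.length : Int)) :
    ∀ (k : Nat) (s : List (Int × Int)), (∀ p ∈ s, pvInB w h p) →
      (pvStepA grid)^[k] s = (pvStepB grid w h)^[k] s := by
  intro k
  induction k with
  | zero => intro s _; rfl
  | succ k ih =>
    intro s hs
    rw [Function.iterate_succ_apply, Function.iterate_succ_apply,
      pvStepA_eq_pvStepB grid w h hw hh s hs]
    exact ih _ (pvStepB_mem grid w h s)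

-- once a 2-cycle is reached, iteration alternates
theorem pvParity (f : List (Int × Int) → List (Int × Int)) (c p : List (Int × Int))
    (hcp : f c = p) (hpc : f p = c) :
    ∀ k, f^[k] c = (if k % 2 = 0 then c else p) ∧ f^[k] p = (if k % 2 = 0 then p else c) := by
  intro k
  induction k with
  | zero => simp
  | succ k ih =>
    rw [Function.iterate_succ_apply, Function.iterate_succ_apply, hcp, hpc]
    rcases Nat.even_or_odd k with hk | hk
    · have h1 : k % 2 = 0 := Nat.even_iff.1 hk
      have h2 : (k + 1) % 2 = 1 := by omega
      simp [h1, h2] at ih ⊢; exact ⟨ih.2, ih.1⟩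
    · have h1 : k % 2 = 1 := Nat.odd_iff.1 hk
      have h2 : (k + 1) % 2 = 0 := by omega
      simp [h1, h2] at ih ⊢; exact ⟨ih.2, ih.1⟩

-- the fueled loop computes the iterate
theorem pvLoopB_eq (grid : List (List String)) (w h : Int) :
    ∀ (fuel : Nat) (prev : Option (List (Int × Int))) (cur : List (Int × Int)),
      (∀ p, prev = some p → pvStepB grid w h p = cur) →
      pvLoopB grid w h fuel prev cur = (pvStepB grid w h)^[fuel] cur := by
  intro fuel
  induction fuel with
  | zero => intro prev cur _; rfl
  | succ fuel ih =>
    intro prev cur hinv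
    rw [pvLoopB]
    split
    · next heq =>
      have hpc : pvStepB grid w h (pvStepB grid w h cur) = cur := hinv _ heq
      have := (pvParity (pvStepB grid w h) cur (pvStepB grid w h cur) rfl hpc (fuel + 1)).1
      rw [this]
    · next hne =>
      rw [ih (some cur) (pvStepB grid w h cur) (by intro p hp; cases hp; rfl)]
      rw [← Function.iterate_succ_apply]

-- when the grid has no '.' at all, both steps produce the empty set
theorem pvNoDot_cell (grid : List (List String)) (hnd : ∀ row ∈ grid, ∀ c ∈ row, c ≠ ".") (y x : Int) :
    pvCellDot grid y x = false := by
  cases hrow : PySem.List.pyGet? grid y with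
  | none => simp [pvCellDot, hrow]
  | some row =>
    cases hc : PySem.List.pyGet? row x with
    | none => simp [pvCellDot, hrow, hc]
    | some c =>
      have hne : c ≠ "." := hnd row (PySem.List.mem_of_pyGet?_eq_some _ hrow) c (PySem.List.mem_of_pyGet?_eq_some _ hc)
      simp [pvCellDot, hrow, hc, hne]

theorem pvStepA_nil_of (grid : List (List String)) (hnd : ∀ row ∈ grid, ∀ c ∈ row, c ≠ ".") (pts : List (Int × Int)) :
    pvStepA grid pts = [] := by
  unfold pvStepA
  simp only [pvNoDot_cell grid hnd, Bool.false_eq_true, and_false, if_false]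
  induction pts with
  | nil => rfl
  | cons p ps ih => simpa only [List.foldl_cons] using ih

theorem pvStepB_nil_of (grid : List (List String)) (w h : Int) (hnd : ∀ row ∈ grid, ∀ c ∈ row, c ≠ ".") (pts : List (Int × Int)) :
    pvStepB grid w h pts = [] := by
  unfold pvStepB
  rw [pvCellDotB_eq]
  simp only [pvNoDot_cell grid hnd, Bool.false_eq_true, and_false, if_false]
  induction pts with
  | nil => rfl
  | cons p ps ih => simpa only [List.foldl_cons] using ih

theorem pvIterate_nil {f : List (Int × Int) → List (Int × Int)} (hf : ∀ s, f s = []) :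
    ∀ (k : Nat) (s : List (Int × Int)), f^[k + 1] s = [] := by
  intro k
  induction k with
  | zero => intro s; simpa using hf s
  | succ k ih => intro s; rw [Function.iterate_succ_apply, hf s]; exact ih []

-- ===== VERDICT (by name: the statement is the Claim_ definition above) =====
theorem determine_occupied_after_steps_spec : Claim_equal_determine_occupied_after_steps := by
  intro grid sps n _ hpre
  unfold Spec_determine_occupied_after_steps determine_occupied_after_steps determine_occupied_after_steps_alt
  rcases hpre with hn | hsps | ⟨_, hb⟩ | ⟨hnd, _⟩
  · have : n.toNat = 0 := by omega
    rw [this]; rfl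
  · -- no starting points: bounds hold vacuously
    subst hsps
    rw [pv_foldl_const, List.length_range,
      pvIter_eq grid _ _ (pvWidth_eq grid).symm rfl n.toNat _ (by intro p hp; simp [PySem.Set.ofList] at hp),
      pvLoopB_eq grid _ _ n.toNat none _ (by intro p hp; cases hp)]
  · rw [pv_foldl_const, List.length_range,
      pvIter_eq grid _ _ (pvWidth_eq grid).symm rfl n.toNat _
        (by intro p hp; exact hb p ((PySem.Set.mem_ofList sps p).1 hp)),
      pvLoopB_eq grid _ _ n.toNat none _ (by intro p hp; cases hp)]
  · -- the grid has no '.': after one step both frontiers are empty forever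
    rcases Nat.eq_zero_or_pos n.toNat with h0 | h1
    · rw [h0]; rfl
    · obtain ⟨k, hk⟩ : ∃ k, n.toNat = k + 1 := ⟨n.toNat - 1, by omega⟩
      rw [pv_foldl_const, List.length_range, hk,
        pvIterate_nil (pvStepA_nil_of grid hnd) k _,
        pvLoopB_eq grid _ _ (k + 1) none _ (by intro p hp; cases hp),
        pvIterate_nil (pvStepB_nil_of grid _ _ hnd) k _]
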